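-- pv_equiv track=rewrite | github.com/ulpi-io/plugin-marketplace | plugins/financial-deep-research/skills/financial-deep-research/scripts/md_to_html.py | _close_sections
-- ===== SOURCE A (Python) =====
-- def _close_sections(html: str) -> str:
--     """Close all open section divs"""
--     lines = html.split('\n')
--     result = []
--     section_open = False
--
--     for line in lines:
--         if '<div class="section">' in line:
--             if section_open:
--                 result.append('</div>')
--             section_open = True
--         result.append(line)
--
--     if section_open:
--         result.append('</div>')
--
--     return '\n'.join(result)
-- ===== SOURCE B (Python) =====
-- def _close_sections(html: str) -> str:
--     """Close all open section divs"""
--     marker = '<div class="section">'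
--
--     def go(lines):
--         # group-then-emit: each marker line starts a block that runs up to
--         # the next marker; emit the block followed by a single '</div>'.
--         if not lines:
--             return []
--         head, rest = lines[0], lines[1:]
--         if marker not in head:
--             return [head] + go(rest)
--         i = 0
--         while i < len(rest) and marker not in rest[i]:
--             i += 1
--         return [head] + rest[:i] + ['</div>'] + go(rest[i:])
--
--     return '\n'.join(go(html.split('\n')))
-- ===== Notes on version B (the rewrite author's own statement) =====
-- stated objective: alternative
-- what changed: Replaced A's single flag-carrying accumulator loop (section_open, close-on-next-marker) with a recursive group-then-emit pass that, at each marker line, takes the whole block up to the next marker and emits it followed by one closing div line.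
import Mathlib
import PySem

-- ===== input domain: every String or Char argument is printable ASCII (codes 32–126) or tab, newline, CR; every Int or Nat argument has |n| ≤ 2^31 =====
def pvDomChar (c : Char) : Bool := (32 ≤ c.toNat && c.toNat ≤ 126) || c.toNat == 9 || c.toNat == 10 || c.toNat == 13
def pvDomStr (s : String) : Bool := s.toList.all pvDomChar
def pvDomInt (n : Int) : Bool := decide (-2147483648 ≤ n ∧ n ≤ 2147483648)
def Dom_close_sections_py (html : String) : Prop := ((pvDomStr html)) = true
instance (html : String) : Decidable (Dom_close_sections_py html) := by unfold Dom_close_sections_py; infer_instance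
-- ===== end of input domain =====

-- B replaces A's interleaved section_open flag with a recursive group-then-emit pass
-- (each marker line starts a block closed by one '</div>'); objective: alternative decomposition.

-- shared marker test: '<div class="section">' in line  (both Pythons use this same test)
def hasMarker (line : String) : Bool := PySem.Str.isIn "<div class=\"section\">" line

-- ===== PORT A =====
-- A's for-loop over the state (result, section_open)
def aLoop : List String → List String → Bool → List String × Bool
  | [], result, so => (result, so)
  | line :: rest, result, so =>
    if hasMarker line then
      aLoop rest ((if so then result ++ ["</div>"] else result) ++ [line]) true
    else
      aLoop rest (result ++ [line]) so

def close_sections_py (html : String) : String :=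
  let lines := (PySem.Str.split? html "\n").getD []   -- sep is non-empty, so split? is always some
  let p := aLoop lines [] false
  PySem.Str.join "\n" (if p.2 then p.1 ++ ["</div>"] else p.1)

-- ===== PORT B =====
-- B's go: on a marker head, take the block up to the next marker, emit it plus '</div>', recurse
def altGo (lines : List String) : List String :=
  match lines with
  | [] => []
  | head :: rest =>
    if hasMarker head then
      head :: (rest.takeWhile (fun l => !hasMarker l)
        ++ ["</div>"]
        ++ altGo (rest.dropWhile (fun l => !hasMarker l)))
    else head :: altGo rest
termination_by lines.length
decreasing_by
· exact Nat.lt_succ_of_le (List.length_dropWhile_le _ _)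
· simp

def close_sections_py_alt (html : String) : String :=
  PySem.Str.join "\n" (altGo ((PySem.Str.split? html "\n").getD []))

-- ===== PRECONDITION & SPEC =====
def Spec_close_sections_py (html : String) (out : String) : Prop := out = close_sections_py_alt html
instance (html : String) (out : String) : Decidable (Spec_close_sections_py html out) := by unfold Spec_close_sections_py; infer_instance

-- ===== CLAIM (what is proved, stated in full; the proofs are below) =====
def Claim_equal_close_sections_py : Prop := ∀ (html : String), Dom_close_sections_py html → Spec_close_sections_py html (close_sections_py html)

-- ===== LEMMAS AND PROOFS =====

-- invariant of A's loop: the finalized result is the accumulator followed by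
-- B's emission of the remaining lines (with the open block's tail when so = true)
theorem aLoop_eq_altGo (lines : List String) : ∀ (acc : List String) (so : Bool),
    (if (aLoop lines acc so).2 then (aLoop lines acc so).1 ++ ["</div>"] else (aLoop lines acc so).1)
      = acc ++ (if so then
          lines.takeWhile (fun l => !hasMarker l) ++ ["</div>"]
            ++ altGo (lines.dropWhile (fun l => !hasMarker l))
        else altGo lines) := by
  induction lines with
  | nil => intro acc so; cases so <;> simp [aLoop, altGo]
  | cons l rest ih =>
    intro acc so
    by_cases h : hasMarker l = true
    · cases so <;>
        simp [aLoop, altGo, h, ih]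
    · rw [Bool.not_eq_true] at h
      cases so <;>
        simp [aLoop, altGo, h, ih]

-- ===== VERDICT (by name: the statement is the Claim_ definition above) =====
theorem close_sections_py_spec : Claim_equal_close_sections_py := by
  intro html _
  unfold Spec_close_sections_py close_sections_py close_sections_py_alt
  simp [aLoop_eq_altGo]
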